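-- pv_equiv track=rewrite | github.com/pku-sixing/IJCAI2020-TopicKA | lib/evaluation_scripts/tokens2wordlevel.py | seq_to_space
-- ===== SOURCE A (Python) =====
-- def seq_to_space(input, space='<space>'):
--     tmp = input.strip('\r\n')
--     words = tmp.split()
--     new_str = []
--     for word in words:
--         new_str += list(word)
--         new_str.append(space)
--     if len(new_str) > 0:
--         new_str = new_str[0:-1]
--     return ' '.join(new_str)
-- ===== SOURCE B (Python) =====
-- def seq_to_space(input, space='<space>'):
--     tmp = input.strip('\r\n')
--     return (' ' + space + ' ').join(' '.join(word) for word in tmp.split())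
-- ===== Notes on version B (the rewrite author's own statement) =====
-- stated objective: idiomatic
-- what changed: Replaces the flat char-plus-marker accumulator list and the trailing-element trim by a grouped two-level join: each word is space-joined into its spaced characters, and the per-word strings are joined with the marker surrounded by single spaces.
import Mathlib
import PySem

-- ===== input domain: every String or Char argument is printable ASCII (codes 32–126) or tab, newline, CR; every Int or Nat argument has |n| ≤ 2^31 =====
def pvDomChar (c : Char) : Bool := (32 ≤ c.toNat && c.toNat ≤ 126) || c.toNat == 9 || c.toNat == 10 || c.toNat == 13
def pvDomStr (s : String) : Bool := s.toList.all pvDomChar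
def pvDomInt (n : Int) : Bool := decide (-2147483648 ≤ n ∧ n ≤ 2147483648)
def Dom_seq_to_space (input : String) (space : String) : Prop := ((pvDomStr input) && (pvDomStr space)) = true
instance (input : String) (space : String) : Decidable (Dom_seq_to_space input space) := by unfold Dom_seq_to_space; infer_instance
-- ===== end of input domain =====

-- B replaces A's flat chars-plus-marker list and trailing trim by a grouped two-level join (idiomatic decomposition, same cost).

-- ===== PORT A =====
def seq_to_space (input : String) (space : String) : String :=
  let tmp := PySem.Str.stripChars input "\r\n"
  let words := PySem.Str.split₀ tmp
  let new_str : List String :=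
    words.foldl (fun acc word => (acc ++ word.toList.map (fun c => String.ofList [c])) ++ [space]) []
  let new_str := if new_str.length > 0 then PySem.List.slice new_str (some 0) (some (-1)) else new_str
  PySem.Str.join " " new_str

-- ===== PORT B =====
def seq_to_space_alt (input : String) (space : String) : String :=
  let tmp := PySem.Str.stripChars input "\r\n"
  PySem.Str.join (" " ++ space ++ " ")
    ((PySem.Str.split₀ tmp).map (fun word => PySem.Str.join " " (word.toList.map (fun c => String.ofList [c]))))

-- ===== PRECONDITION & SPEC =====
def Spec_seq_to_space (input : String) (space : String) (out : String) : Prop := out = seq_to_space_alt input space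
instance (input : String) (space : String) (out : String) : Decidable (Spec_seq_to_space input space out) := by unfold Spec_seq_to_space; infer_instance

-- ===== CLAIM (what is proved, stated in full; the proofs are below) =====
def Claim_equal_seq_to_space : Prop := ∀ (input : String) (space : String), Dom_seq_to_space input space → Spec_seq_to_space input space (seq_to_space input space)

-- ===== LEMMAS AND PROOFS =====

-- every word produced by split₀ is nonempty
theorem pv_go_ne_nil (s cur : List Char) (acc : List (List Char))
    (h : ∀ w ∈ acc, w ≠ []) :
    ∀ w ∈ PySem.Chars.split₀.go s cur acc, w ≠ ([] : List Char) := by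
  induction s generalizing cur acc with
  | nil =>
    intro w hw
    simp only [PySem.Chars.split₀.go] at hw
    by_cases hc : cur.isEmpty
    · simp [hc] at hw; exact h w hw
    · simp [hc] at hw
      rcases hw with h1 | h1
      · exact h w h1
      · subst h1; simpa [List.isEmpty_iff] using hc
  | cons c rest ih =>
    intro w hw
    simp only [PySem.Chars.split₀.go] at hw
    by_cases hs : PySem.Chars.isspace c
    · by_cases hc : cur.isEmpty
      · simp [hs, hc] at hw; exact ih [] acc h w hw
      · simp [hs, hc] at hw
        refine ih [] (cur.reverse :: acc) ?_ w hw
        intro v hv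
        rcases List.mem_cons.mp hv with h1 | h1
        · subst h1; simpa [List.isEmpty_iff] using hc
        · exact h v h1
    · simp [hs] at hw
      exact ih (c :: cur) acc h w hw

theorem pv_split₀_ne_nil (s : List Char) :
    ∀ w ∈ PySem.Chars.split₀ s, w ≠ ([] : List Char) := by
  intro w hw
  exact pv_go_ne_nil s [] [] (by simp) w hw

-- A's foldl loop flattened
theorem pv_foldl_flat {α β : Type} (f : α → List β) (m : β) :
    ∀ (ws : List α) (acc : List β),
      ws.foldl (fun a w => (a ++ f w) ++ [m]) acc = acc ++ ws.flatMap (fun w => f w ++ [m]) := by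
  intro ws
  induction ws with
  | nil => simp
  | cons w ws ih => intro acc; simp [List.foldl_cons, List.flatMap_def]

-- join over a concatenation of nonempty piece lists
theorem pv_join_append (sep : List Char) :
    ∀ (xs ys : List (List Char)), xs ≠ [] → ys ≠ [] →
      PySem.Chars.join sep (xs ++ ys) = PySem.Chars.join sep xs ++ sep ++ PySem.Chars.join sep ys := by
  intro xs
  induction xs with
  | nil => intro ys h _; exact absurd rfl h
  | cons x xs ih =>
    intro ys _ hys
    cases xs with
    | nil =>
      cases ys with
      | nil => exact absurd rfl hys
      | cons y ys =>
        simp [PySem.Chars.join_cons_cons, PySem.Chars.join_singleton]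
    | cons x' xs' =>
      have step1 : PySem.Chars.join sep ((x :: x' :: xs') ++ ys)
          = x ++ sep ++ PySem.Chars.join sep ((x' :: xs') ++ ys) := by
        have h2 := PySem.Chars.join_cons_cons sep x x' (xs' ++ ys)
        simpa using h2
      rw [step1, ih ys (by simp) hys, PySem.Chars.join_cons_cons]
      simp [List.append_assoc]

-- the core identity: trimmed flat list of chars-plus-markers vs grouped two-level join
theorem pv_main (ss : List Char) :
    ∀ (ws : List (List Char)), (∀ w ∈ ws, w ≠ []) →
      PySem.Chars.join [' ']
          ((ws.flatMap (fun w => w.map (fun c => [c]) ++ [ss])).dropLast)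
        = PySem.Chars.join (' ' :: (ss ++ [' ']))
            (ws.map (fun w => PySem.Chars.join [' '] (w.map (fun c => [c])))) := by
  intro ws
  induction ws with
  | nil => simp [PySem.Chars.join_nil]
  | cons w ws ih =>
    intro h
    have hw : w ≠ [] := h w (by simp)
    cases ws with
    | nil =>
      simp only [List.flatMap_cons, List.flatMap_nil, List.append_nil, List.map_cons,
        List.map_nil, PySem.Chars.join_singleton]
      rw [List.dropLast_concat]
    | cons w' ws' =>
      have htail : ((w' :: ws').flatMap (fun w => w.map (fun c => [c]) ++ [ss])) ≠ [] := by
        simp [List.flatMap_cons]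
      have hmapw : w.map (fun c => ([c] : List Char)) ≠ [] := by
        simpa using hw
      rw [List.flatMap_cons, List.append_assoc,
        List.dropLast_append_of_ne_nil (by simp)]
      have htaildrop : ([ss] ++ (w' :: ws').flatMap (fun w => w.map (fun c => [c]) ++ [ss])).dropLast
          = [ss] ++ ((w' :: ws').flatMap (fun w => w.map (fun c => [c]) ++ [ss])).dropLast := by
        exact List.dropLast_append_of_ne_nil htail
      rw [htaildrop]
      have hdropne : (([ss] ++ ((w' :: ws').flatMap (fun w => w.map (fun c => [c]) ++ [ss])).dropLast))
          ≠ [] := by simp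
      rw [pv_join_append [' '] (w.map (fun c => [c]))
        ([ss] ++ ((w' :: ws').flatMap (fun w => w.map (fun c => [c]) ++ [ss])).dropLast) hmapw hdropne]
      have hdrop2 : ((w' :: ws').flatMap (fun w => w.map (fun c => [c]) ++ [ss])).dropLast ≠ [] := by
        have hw' : w' ≠ [] := h w' (by simp)
        cases w' with
        | nil => exact absurd rfl hw'
        | cons c cs =>
          intro hcontra
          have hlen := congrArg List.length hcontra
          simp [List.flatMap_cons] at hlen
      rw [pv_join_append [' '] [ss] _ (by simp) hdrop2, PySem.Chars.join_singleton]
      rw [ih (fun v hv => h v (by simp [hv]))]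
      simp only [List.map_cons]
      rw [PySem.Chars.join_cons_cons]
      simp [List.append_assoc]

theorem pv_slice_dropLast {α : Type} (xs : List α) :
    PySem.List.slice xs (some 0) (some (-1)) = xs.dropLast := by
  simp [PySem.List.slice, List.dropLast_eq_take]

-- ===== VERDICT (by name: the statement is the Claim_ definition above) =====
theorem seq_to_space_spec : Claim_equal_seq_to_space := by
  intro input space _
  unfold Spec_seq_to_space seq_to_space seq_to_space_alt
  apply String.toList_inj.mp
  dsimp only
  rw [pv_slice_dropLast]
  have hif : ∀ (l : List String), (if l.length > 0 then l.dropLast else l) = l.dropLast := by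
    intro l; cases l <;> simp
  rw [hif]
  rw [pv_foldl_flat (fun word : String => word.toList.map (fun c => String.ofList [c])) space]
  rw [List.nil_append]
  set ws := PySem.Str.split₀ (PySem.Str.stripChars input "\r\n") with hws
  rw [PySem.Str.toList_join, PySem.Str.toList_join]
  have hmapdrop : ∀ (l : List String), (l.dropLast).map String.toList = (l.map String.toList).dropLast := by
    intro l; exact List.map_dropLast
  rw [hmapdrop]
  have hflat : (ws.flatMap (fun w => w.toList.map (fun c => String.ofList [c]) ++ [space])).map String.toList
      = (ws.map String.toList).flatMap (fun w => w.map (fun c => [c]) ++ [space.toList]) := by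
    simp [List.map_flatMap, List.flatMap_map, Function.comp_def]
  rw [hflat]
  have hone : ∀ (w : String),
      (PySem.Str.join " " (w.toList.map (fun c => String.ofList [c]))).toList
        = PySem.Chars.join [' '] (w.toList.map (fun c => [c])) := by
    intro w
    have h1 : (" " : String).toList = [' '] := rfl
    have h2 : (w.toList.map (fun c => String.ofList [c])).map String.toList
        = w.toList.map (fun c => ([c] : List Char)) := by
      rw [List.map_map]
      apply List.map_congr_left
      intro c _
      simp
    rw [PySem.Str.toList_join, h1, h2]
  have hmaps : (ws.map (fun word => PySem.Str.join " " (word.toList.map (fun c => String.ofList [c])))).map String.toList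
      = (ws.map String.toList).map (fun w => PySem.Chars.join [' '] (w.map (fun c => [c]))) := by
    rw [List.map_map, List.map_map]
    apply List.map_congr_left
    intro w _
    exact hone w
  rw [hmaps]
  have hsep : (" " ++ space ++ " ").toList = ' ' :: (space.toList ++ [' ']) := by
    simp
  rw [hsep]
  have hsp : (" " : String).toList = [' '] := rfl
  rw [hsp]
  apply pv_main
  intro w hw
  rcases List.mem_map.mp hw with ⟨v, hv, hveq⟩
  subst hveq
  have := pv_split₀_ne_nil (PySem.Str.stripChars input "\r\n").toList
  have hv' : v.toList ∈ PySem.Chars.split₀ (PySem.Str.stripChars input "\r\n").toList := by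
    rw [← PySem.Str.split₀_map_toList]
    exact List.mem_map_of_mem hv
  exact this v.toList hv'
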